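-- pv_equiv track=rewrite | github.com/jimhouserock/data_pipeline_test_github_actions | transform.py | _generate_week_summary
-- ===== SOURCE A (Python) =====
-- def _generate_week_summary(forecast_data):
--     """Generate a summary of the week's weather."""
--     if not forecast_data:
--         return "No forecast data available"
--
--     weather_codes = [day.get('weather_code') for day in forecast_data if day.get('weather_code') is not None]
--
--     # Count weather types
--     clear_days = sum(1 for code in weather_codes if code in [0, 1])
--     cloudy_days = sum(1 for code in weather_codes if code in [2, 3])
--     rainy_days = sum(1 for code in weather_codes if code in range(51, 82))
--     snowy_days = sum(1 for code in weather_codes if code in range(71, 87))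
--
--     summary_parts = []
--     if clear_days > 0:
--         summary_parts.append(f"{clear_days} clear day{'s' if clear_days > 1 else ''}")
--     if cloudy_days > 0:
--         summary_parts.append(f"{cloudy_days} cloudy day{'s' if cloudy_days > 1 else ''}")
--     if rainy_days > 0:
--         summary_parts.append(f"{rainy_days} rainy day{'s' if rainy_days > 1 else ''}")
--     if snowy_days > 0:
--         summary_parts.append(f"{snowy_days} snowy day{'s' if snowy_days > 1 else ''}")
--
--     return ", ".join(summary_parts) if summary_parts else "Mixed conditions"
-- ===== SOURCE B (Python) =====
-- def _generate_week_summary(forecast_data):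
--     """Generate a summary of the week's weather (single-pass counting)."""
--     if not forecast_data:
--         return "No forecast data available"
--
--     clear = cloudy = rainy = snowy = 0
--     for day in forecast_data:
--         code = day.get('weather_code')
--         if code is None:
--             continue
--         if code == 0 or code == 1:
--             clear += 1
--         if code == 2 or code == 3:
--             cloudy += 1
--         if 51 <= code <= 81:
--             rainy += 1
--         if 71 <= code <= 86:
--             snowy += 1
--
--     parts = []
--     for count, label in ((clear, "clear"), (cloudy, "cloudy"), (rainy, "rainy"), (snowy, "snowy")):
--         if count > 0:
--             parts.append(f"{count} {label} day" + ("s" if count > 1 else ""))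
--     return ", ".join(parts) if parts else "Mixed conditions"
-- ===== Notes on version B (the rewrite author's own statement) =====
-- stated objective: alternative
-- what changed: Replaced the intermediate weather_codes list and four separate sum-comprehension passes with one loop over forecast_data maintaining four counters (keeping the overlapping rainy/snowy ranges), and built the summary by iterating over a (count,label) table instead of four copy-pasted if-blocks.
import Mathlib
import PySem

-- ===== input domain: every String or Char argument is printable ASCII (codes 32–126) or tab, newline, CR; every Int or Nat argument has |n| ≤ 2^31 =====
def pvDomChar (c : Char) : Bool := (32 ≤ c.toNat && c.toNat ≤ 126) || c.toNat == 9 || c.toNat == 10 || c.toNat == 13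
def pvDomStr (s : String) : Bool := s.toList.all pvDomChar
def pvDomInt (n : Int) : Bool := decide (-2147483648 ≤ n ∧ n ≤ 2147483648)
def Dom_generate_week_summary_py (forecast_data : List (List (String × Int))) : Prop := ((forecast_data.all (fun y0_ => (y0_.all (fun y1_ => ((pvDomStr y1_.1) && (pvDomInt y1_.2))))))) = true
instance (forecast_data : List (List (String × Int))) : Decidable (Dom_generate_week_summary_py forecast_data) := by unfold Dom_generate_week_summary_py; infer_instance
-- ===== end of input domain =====

-- B replaces the four counting passes and four copy-pasted if-blocks with one counting loop and a (count,label) table; equal return value on all inputs (alternative decomposition, no speed claim).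
-- ===== PORT A =====
-- day.get('weather_code'): first-match lookup in the association list (dict)
def pvGetWC (day : List (String × Int)) : Option Int :=
  (PySem.Dict.mk day).get? "weather_code"

-- literal port of A: build weather_codes, then four separate counting passes,
-- then four if-blocks appending to summary_parts
def generate_week_summary_py (forecast_data : List (List (String × Int))) : String :=
  if forecast_data = [] then "No forecast data available" else
  let weather_codes : List Int := forecast_data.filterMap pvGetWC
  let clear_days : Int := ((weather_codes.countP (fun c => decide (c = 0 ∨ c = 1))) : Int)
  let cloudy_days : Int := ((weather_codes.countP (fun c => decide (c = 2 ∨ c = 3))) : Int)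
  let rainy_days : Int := ((weather_codes.countP (fun c => decide (51 ≤ c ∧ c < 82))) : Int)
  let snowy_days : Int := ((weather_codes.countP (fun c => decide (71 ≤ c ∧ c < 87))) : Int)
  let summary_parts : List String := []
  let summary_parts := if clear_days > 0 then
      summary_parts ++ [PySem.Int.toStr clear_days ++ " clear day" ++ (if clear_days > 1 then "s" else "")]
    else summary_parts
  let summary_parts := if cloudy_days > 0 then
      summary_parts ++ [PySem.Int.toStr cloudy_days ++ " cloudy day" ++ (if cloudy_days > 1 then "s" else "")]
    else summary_parts
  let summary_parts := if rainy_days > 0 then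
      summary_parts ++ [PySem.Int.toStr rainy_days ++ " rainy day" ++ (if rainy_days > 1 then "s" else "")]
    else summary_parts
  let summary_parts := if snowy_days > 0 then
      summary_parts ++ [PySem.Int.toStr snowy_days ++ " snowy day" ++ (if snowy_days > 1 then "s" else "")]
    else summary_parts
  if summary_parts = [] then "Mixed conditions" else PySem.Str.join ", " summary_parts

-- ===== PORT B =====
-- single pass over forecast_data updating the four counters
def pvCountStep (acc : Int × Int × Int × Int) (day : List (String × Int)) : Int × Int × Int × Int :=
  match pvGetWC day with
  | none => acc
  | some code =>
    let cl := if code = 0 ∨ code = 1 then acc.1 + 1 else acc.1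
    let cd := if code = 2 ∨ code = 3 then acc.2.1 + 1 else acc.2.1
    let ra := if 51 ≤ code ∧ code ≤ 81 then acc.2.2.1 + 1 else acc.2.2.1
    let sn := if 71 ≤ code ∧ code ≤ 86 then acc.2.2.2 + 1 else acc.2.2.2
    (cl, cd, ra, sn)

def generate_week_summary_py_alt (forecast_data : List (List (String × Int))) : String :=
  if forecast_data = [] then "No forecast data available" else
  let c := forecast_data.foldl pvCountStep (0, 0, 0, 0)
  let parts := [(c.1, "clear"), (c.2.1, "cloudy"), (c.2.2.1, "rainy"), (c.2.2.2, "snowy")].foldl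
    (fun (ps : List String) (p : Int × String) =>
      if p.1 > 0 then ps ++ [PySem.Int.toStr p.1 ++ " " ++ p.2 ++ " day" ++ (if p.1 > 1 then "s" else "")]
      else ps) []
  if parts = [] then "Mixed conditions" else PySem.Str.join ", " parts

-- ===== PRECONDITION & SPEC =====
def Spec_generate_week_summary_py (forecast_data : List (List (String × Int))) (out : String) : Prop := out = generate_week_summary_py_alt forecast_data
instance (forecast_data : List (List (String × Int))) (out : String) : Decidable (Spec_generate_week_summary_py forecast_data out) := by unfold Spec_generate_week_summary_py; infer_instance

-- ===== CLAIM (what is proved, stated in full; the proofs are below) =====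
def Claim_equal_generate_week_summary_py : Prop := ∀ (forecast_data : List (List (String × Int))), Dom_generate_week_summary_py forecast_data → Spec_generate_week_summary_py forecast_data (generate_week_summary_py forecast_data)

-- ===== LEMMAS AND PROOFS =====

theorem pvAppend_label (w : String) (s : String) :
    ((s ++ " ") ++ w) ++ (" day") = s ++ (" " ++ (w ++ " day")) := by
  rw [String.append_assoc, String.append_assoc]

theorem pvFoldCounts (fd : List (List (String × Int))) (a b c d : Int) :
    fd.foldl pvCountStep (a, b, c, d) =
      (a + ((fd.filterMap pvGetWC).countP (fun c => decide (c = 0 ∨ c = 1)) : Int),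
       b + ((fd.filterMap pvGetWC).countP (fun c => decide (c = 2 ∨ c = 3)) : Int),
       c + ((fd.filterMap pvGetWC).countP (fun c => decide (51 ≤ c ∧ c < 82)) : Int),
       d + ((fd.filterMap pvGetWC).countP (fun c => decide (71 ≤ c ∧ c < 87)) : Int)) := by
  induction fd generalizing a b c d with
  | nil => simp
  | cons hd tl ih =>
    simp only [List.foldl_cons, List.filterMap_cons]
    cases h : pvGetWC hd with
    | none => simp [pvCountStep, h, ih]
    | some code =>
      simp only [pvCountStep, h, ih, List.countP_cons]
      refine Prod.ext ?_ (Prod.ext ?_ (Prod.ext ?_ ?_)) <;> simp <;> split_ifs <;> omega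

theorem generate_week_summary_py_spec : Claim_equal_generate_week_summary_py := by
  intro fd _
  unfold Spec_generate_week_summary_py generate_week_summary_py generate_week_summary_py_alt
  by_cases h : fd = []
  · simp [h]
  · simp only [if_neg h]
    rw [pvFoldCounts fd 0 0 0 0]
    simp only [List.foldl_cons, List.foldl_nil, zero_add]
    simp only [pvAppend_label]
    have h1 : (" " ++ ("clear" ++ " day") : String) = " clear day" := by decide
    have h2 : (" " ++ ("cloudy" ++ " day") : String) = " cloudy day" := by decide
    have h3 : (" " ++ ("rainy" ++ " day") : String) = " rainy day" := by decide
    have h4 : (" " ++ ("snowy" ++ " day") : String) = " snowy day" := by decide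
    rw [h1, h2, h3, h4]
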